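-- pv_equiv track=rewrite | github.com/Armvda11/inge_RZ | code/test_spray_and_wait.py | create_test_network
-- ===== SOURCE A (Python) =====
-- def create_test_network(t: int, num_nodes: int = 10) -> dict[int, set[int]]:
--     """
--     Crée un réseau test pour simuler des connexions dynamiques.
--
--     Args:
--         t (int): L'instant de temps (pour varier les connexions)
--         num_nodes (int): Nombre de nœuds dans le réseau
--
--     Returns:
--         dict[int, set[int]]: Dictionnaire d'adjacence
--     """
--     # Initialiser le réseau vide
--     adjacency = {i: set() for i in range(num_nodes)}
--
--     # Connecter des nœuds en fonction du temps
--     # On utilise une méthode simple basée sur t pour avoir des connexions variables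
--     for i in range(num_nodes):
--         # Créer des connexions variables en fonction du temps
--         for j in range(num_nodes):
--             if i != j:
--                 # Condition pour créer une connexion basée sur le temps (exemple: modulo)
--                 # Cette formule crée des modèles répétitifs basés sur le temps
--                 if (i + j + t) % 3 == 0:
--                     adjacency[i].add(j)
--                     adjacency[j].add(i)
--
--     return adjacency
-- ===== SOURCE B (Python) =====
-- def create_test_network(t: int, num_nodes: int = 10) -> dict[int, set[int]]:
--     # Residue-class bucketing: i~j iff (i+j+t)%3==0, i.e. j%3 == (-i-t)%3.
--     buckets = {0: [], 1: [], 2: []}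
--     for node in range(num_nodes):
--         buckets[node % 3].append(node)
--     adjacency = {}
--     for i in range(num_nodes):
--         target = (-i - t) % 3
--         neigh = set(buckets[target])
--         neigh.discard(i)
--         adjacency[i] = neigh
--     return adjacency
-- ===== Notes on version B (the rewrite author's own statement) =====
-- stated objective: faster
-- what changed: Replaces the O(n^2) pairwise double loop with residue-class bucketing mod 3: one pass builds buckets of nodes by n%3, one pass assigns each node i a copy of the bucket of residue (-i-t)%3 with i discarded.
import Mathlib
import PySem

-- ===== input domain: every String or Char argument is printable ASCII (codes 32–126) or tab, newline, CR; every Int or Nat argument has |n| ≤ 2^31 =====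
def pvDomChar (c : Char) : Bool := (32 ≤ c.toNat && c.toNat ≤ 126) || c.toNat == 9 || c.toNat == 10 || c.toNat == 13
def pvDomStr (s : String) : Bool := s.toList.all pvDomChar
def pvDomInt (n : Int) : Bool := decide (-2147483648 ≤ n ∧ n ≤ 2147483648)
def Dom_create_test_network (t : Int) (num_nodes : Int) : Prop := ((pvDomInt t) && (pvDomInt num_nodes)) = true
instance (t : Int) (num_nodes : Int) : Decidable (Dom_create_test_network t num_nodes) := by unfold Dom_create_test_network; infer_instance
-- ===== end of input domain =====

-- B replaces A's pairwise double loop by residue-class buckets mod 3 (one pass to bucket the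
-- nodes, one pass to hand each node a copy of its matching bucket); same returned dict, proved equal.

-- ===== PORT A =====
def create_test_network (t : Int) (num_nodes : Int) : List (Int × List Int) :=
  let adjacency : PySem.Dict Int (PySem.Set Int) :=
    (PySem.List.pyRange 0 num_nodes 1).foldl (fun d i => d.insert i PySem.Set.empty) PySem.Dict.empty
  let adjacency :=
    (PySem.List.pyRange 0 num_nodes 1).foldl (fun d i =>
      (PySem.List.pyRange 0 num_nodes 1).foldl (fun d j =>
        if i ≠ j then
          if PySem.Int.mod (i + j + t) 3 = 0 then
            (d.modify i PySem.Set.empty (fun s => PySem.Set.add s j)).modify j PySem.Set.empty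
              (fun s => PySem.Set.add s i)
          else d
        else d) d) adjacency
  adjacency.items

-- ===== PORT B =====
def create_test_network_alt (t : Int) (num_nodes : Int) : List (Int × List Int) :=
  let buckets : PySem.Dict Int (List Int) := PySem.Dict.ofList [(0, []), (1, []), (2, [])]
  let buckets :=
    (PySem.List.pyRange 0 num_nodes 1).foldl
      (fun b node => b.modify (PySem.Int.mod node 3) [] (fun l => l ++ [node])) buckets
  let adjacency : PySem.Dict Int (PySem.Set Int) :=
    (PySem.List.pyRange 0 num_nodes 1).foldl (fun d i =>
      let target := PySem.Int.mod (-i - t) 3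
      let neigh : PySem.Set Int := PySem.Set.ofList (buckets.getD target [])
      let neigh := PySem.Set.discard neigh i
      d.insert i neigh) PySem.Dict.empty
  adjacency.items

-- ===== PRECONDITION & SPEC =====
def Spec_create_test_network (t : Int) (num_nodes : Int) (out : List (Int × List Int)) : Prop := out = create_test_network_alt t num_nodes
instance (t : Int) (num_nodes : Int) (out : List (Int × List Int)) : Decidable (Spec_create_test_network t num_nodes out) := by unfold Spec_create_test_network; infer_instance

-- ===== CLAIM (what is proved, stated in full; the proofs are below) =====
def Claim_equal_create_test_network : Prop := ∀ (t : Int) (num_nodes : Int), Dom_create_test_network t num_nodes → Spec_create_test_network t num_nodes (create_test_network t num_nodes)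

-- ===== LEMMAS AND PROOFS =====

-- the common row: neighbours of m, in increasing order
def pvPred (t m j : Int) : Bool := decide (j ≠ m) && decide (PySem.Int.mod (m + j + t) 3 = 0)
def pvRow (t n m : Int) : List Int := (PySem.List.pyRange 0 n 1).filter (pvPred t m)

-- what one inner step of A does to the value stored at key m
def pvG (t i m : Int) (s : List Int) (j : Int) : List Int :=
  if i ≠ j ∧ PySem.Int.mod (i + j + t) 3 = 0 then
    (if m = i then PySem.Set.add s j else if m = j then PySem.Set.add s i else s)
  else s

lemma pv_add_mem (s : List Int) (x : Int) (h : x ∈ s) : PySem.Set.add s x = s := by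
  simp [PySem.Set.add, PySem.Set.contains, h]

lemma pv_add_not_mem (s : List Int) (x : Int) (h : x ∉ s) : PySem.Set.add s x = s ++ [x] := by
  simp [PySem.Set.add, PySem.Set.contains, h]

lemma pv_inner_getD (t i m : Int) (js : List Int) (d : PySem.Dict Int (PySem.Set Int)) :
    ((js.foldl (fun d j =>
        if i ≠ j then
          if PySem.Int.mod (i + j + t) 3 = 0 then
            (d.modify i PySem.Set.empty (fun s => PySem.Set.add s j)).modify j PySem.Set.empty
              (fun s => PySem.Set.add s i)
          else d
        else d) d).getD m PySem.Set.empty)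
      = js.foldl (pvG t i m) (d.getD m PySem.Set.empty) := by
  induction js generalizing d with
  | nil => rfl
  | cons j js ih =>
    rw [List.foldl_cons, List.foldl_cons, ih]
    congr 1
    by_cases hij : i ≠ j
    · by_cases hmod : PySem.Int.mod (i + j + t) 3 = 0
      · rw [if_pos hij, if_pos hmod]
        simp only [PySem.Dict.getD_modify, pvG]
        rw [if_pos (show i ≠ j ∧ PySem.Int.mod (i + j + t) 3 = 0 from ⟨hij, hmod⟩)]
        by_cases hmj : m = j
        · simp [hmj, Ne.symm hij]
        · rw [if_neg hmj]
          by_cases hmi : m = i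
          · simp [hmi]
          · simp only [if_neg hmi, if_neg hmj]
      · rw [if_pos hij, if_neg hmod]
        simp only [pvG]
        rw [if_neg (fun h => hmod h.2)]
    · rw [if_neg hij]
      simp only [pvG]
      rw [if_neg (fun h => hij h.1)]

lemma pv_outer_getD (t n m : Int) (is : List Int) (d : PySem.Dict Int (PySem.Set Int)) :
    ((is.foldl (fun d i =>
        (PySem.List.pyRange 0 n 1).foldl (fun d j =>
          if i ≠ j then
            if PySem.Int.mod (i + j + t) 3 = 0 then
              (d.modify i PySem.Set.empty (fun s => PySem.Set.add s j)).modify j PySem.Set.empty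
                (fun s => PySem.Set.add s i)
            else d
          else d) d) d).getD m PySem.Set.empty)
      = is.foldl (fun s i => (PySem.List.pyRange 0 n 1).foldl (pvG t i m) s)
          (d.getD m PySem.Set.empty) := by
  induction is generalizing d with
  | nil => rfl
  | cons i is ih =>
    rw [List.foldl_cons, List.foldl_cons, ih, pv_inner_getD]

-- identity fold: adding only elements already present changes nothing
lemma pv_foldl_addif_id (p : Int → Bool) (L : List Int) : ∀ (s : List Int),
    (∀ j ∈ L, p j = true → j ∈ s) →
    L.foldl (fun s j => if p j then PySem.Set.add s j else s) s = s := by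
  induction L with
  | nil => intro s _; rfl
  | cons j L ih =>
    intro s h
    rw [List.foldl_cons]
    by_cases hp : p j
    · rw [if_pos hp, pv_add_mem _ _ (h j (by simp) hp)]
      exact ih s (fun j' hj' hp' => h j' (by simp [hj']) hp')
    · rw [if_neg hp]
      exact ih s (fun j' hj' hp' => h j' (by simp [hj']) hp')

-- extension fold: adding the fresh elements of [b, c) onto the filter of [a, b)
lemma pv_foldl_addif_ext (p : Int → Bool) (c : Int) : ∀ (b : Int), b ≤ c → ∀ (a : Int), a ≤ b →
    (PySem.List.pyRange b c 1).foldl (fun s j => if p j then PySem.Set.add s j else s)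
        ((PySem.List.pyRange a b 1).filter p)
      = (PySem.List.pyRange a c 1).filter p := by
  have aux : ∀ (k : Nat) (b : Int), (c - b).toNat = k → b ≤ c → ∀ (a : Int), a ≤ b →
      (PySem.List.pyRange b c 1).foldl (fun s j => if p j then PySem.Set.add s j else s)
          ((PySem.List.pyRange a b 1).filter p)
        = (PySem.List.pyRange a c 1).filter p := by
    intro k
    induction k with
    | zero =>
      intro b hk hbc a hab
      have hbc' : b = c := by omega
      subst hbc'
      rw [PySem.List.pyRange_one_eq_nil (le_refl b), List.foldl_nil]
    | succ k ih =>
      intro b hk hbc a hab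
      have hbc' : b < c := by omega
      rw [PySem.List.pyRange_one_cons hbc', List.foldl_cons]
      by_cases hp : p b
      · rw [if_pos hp, pv_add_not_mem _ _ (fun hmem => by
          rw [List.mem_filter, PySem.List.mem_pyRange_one] at hmem; omega)]
        have hstep : (PySem.List.pyRange a b 1).filter p ++ [b]
            = (PySem.List.pyRange a (b + 1) 1).filter p := by
          rw [PySem.List.pyRange_one_succ_right hab, List.filter_append]
          simp [hp]
        rw [hstep]
        exact ih (b + 1) (by omega) (by omega) a (by omega)
      · rw [if_neg hp]
        have hstep : (PySem.List.pyRange a b 1).filter p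
            = (PySem.List.pyRange a (b + 1) 1).filter p := by
          rw [PySem.List.pyRange_one_succ_right hab, List.filter_append]
          simp [hp]
        rw [hstep]
        exact ih (b + 1) (by omega) (by omega) a (by omega)
  intro b hbc a hab
  exact aux (c - b).toNat b rfl hbc a hab

-- the inner fold at i = m completes the row
lemma pv_inner_at_self (t m k n : Int) (h0 : 0 ≤ k) (hkn : k ≤ n) :
    (PySem.List.pyRange 0 n 1).foldl (pvG t m m) ((PySem.List.pyRange 0 k 1).filter (pvPred t m))
      = pvRow t n m := by
  unfold pvRow
  have hfun : ∀ (acc : List Int), ∀ j ∈ PySem.List.pyRange 0 n 1,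
      pvG t m m acc j = if pvPred t m j then PySem.Set.add acc j else acc := by
    intro acc j _
    by_cases h1 : j = m
    · subst h1; simp [pvG, pvPred]
    · simp [pvG, pvPred, h1, Ne.symm h1]
  rw [PySem.List.foldl_congr_mem _ _ _ _ hfun]
  conv_lhs => rw [PySem.List.pyRange_one_append 0 k n h0 hkn]
  rw [List.foldl_append]
  rw [pv_foldl_addif_id _ _ _ (fun j hj hp => List.mem_filter.2 ⟨hj, hp⟩)]
  exact pv_foldl_addif_ext (pvPred t m) n k hkn 0 h0

-- the inner fold at i = k ≠ m is the identity away from j = m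
lemma pv_inner_skip (t k m : Int) (hmk : m ≠ k) (L : List Int) : ∀ (s : List Int),
    (∀ j ∈ L, j ≠ m) → L.foldl (pvG t k m) s = s := by
  induction L with
  | nil => intro s _; rfl
  | cons j L ih =>
    intro s h
    rw [List.foldl_cons]
    have hjm : j ≠ m := h j (by simp)
    have hstep : pvG t k m s j = s := by
      simp [pvG, hmk, Ne.symm hjm]
    rw [hstep]
    exact ih s (fun j' hj' => h j' (by simp [hj']))

lemma pv_inner_single (t k m : Int) (hmk : m ≠ k) (a b : Int) (ha : a ≤ m) (hb : m < b)
    (s : List Int) :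
    (PySem.List.pyRange a b 1).foldl (pvG t k m) s
      = if pvPred t m k then PySem.Set.add s k else s := by
  rw [PySem.List.pyRange_one_append a m b ha (le_of_lt hb), List.foldl_append,
    PySem.List.pyRange_one_cons hb, List.foldl_cons]
  rw [pv_inner_skip t k m hmk _ _ (fun j hj => by
    rw [PySem.List.mem_pyRange_one] at hj; omega)]
  rw [pv_inner_skip t k m hmk _ _ (fun j hj => by
    rw [PySem.List.mem_pyRange_one] at hj; omega)]
  simp only [pvG, pvPred,
    show PySem.Int.mod (m + k + t) 3 = PySem.Int.mod (k + m + t) 3 from by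
      rw [Int.add_comm m k]]
  simp [hmk, Ne.symm hmk]

-- the outer invariant: after the outer prefix [0, k), row m is complete iff m < k
lemma pv_inv (t n : Int) : ∀ (k : Nat), (k : Int) ≤ n → ∀ (m : Int), 0 ≤ m → m < n →
    (PySem.List.pyRange 0 (k : Int) 1).foldl
        (fun s i => (PySem.List.pyRange 0 n 1).foldl (pvG t i m) s) ([] : List Int)
      = if m < (k : Int) then pvRow t n m
        else (PySem.List.pyRange 0 (k : Int) 1).filter (pvPred t m) := by
  intro k
  induction k with
  | zero =>
    intro _ m h0 hm
    rw [Nat.cast_zero, PySem.List.pyRange_one_eq_nil (le_refl 0), List.foldl_nil,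
      if_neg (by omega)]
    rfl
  | succ k ih =>
    intro hk m h0 hm
    have hk' : (k : Int) ≤ n := by push_cast at hk ⊢; omega
    have hkn : (k : Int) < n := by push_cast at hk ⊢; omega
    have hcast : ((k + 1 : Nat) : Int) = (k : Int) + 1 := by push_cast; ring
    rw [hcast, PySem.List.pyRange_one_succ_right (Int.natCast_nonneg k), List.foldl_append,
      ih hk' m h0 hm]
    simp only [List.foldl_cons, List.foldl_nil]
    rcases lt_trichotomy m (k : Int) with hlt | heq | hgt
    · rw [if_pos hlt, if_pos (by omega)]
      rw [pv_inner_single t (k : Int) m (by omega) 0 n h0 hm]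
      by_cases hp : pvPred t m (k : Int)
      · rw [if_pos hp, pv_add_mem]
        unfold pvRow
        rw [List.mem_filter, PySem.List.mem_pyRange_one]
        exact ⟨⟨Int.natCast_nonneg k, hkn⟩, hp⟩
      · rw [if_neg hp]
    · rw [if_neg (by omega), if_pos (by omega)]
      subst heq
      exact pv_inner_at_self t _ _ n h0 hk'
    · rw [if_neg (by omega), if_neg (by omega)]
      rw [pv_inner_single t (k : Int) m (by omega) 0 n h0 hm, List.filter_append]
      by_cases hp : pvPred t m (k : Int)
      · rw [if_pos hp, pv_add_not_mem _ _ (fun hmem => by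
          rw [List.mem_filter, PySem.List.mem_pyRange_one] at hmem; omega)]
        simp [hp]
      · rw [if_neg hp]
        simp [hp]

-- A's init dict stores the empty set everywhere
lemma pv_init_getD (L : List Int) : ∀ (d : PySem.Dict Int (PySem.Set Int)) (m : Int),
    d.getD m PySem.Set.empty = PySem.Set.empty →
    ((L.foldl (fun d i => d.insert i PySem.Set.empty) d).getD m PySem.Set.empty)
      = PySem.Set.empty := by
  induction L with
  | nil => intro d m h; exact h
  | cons i L ih =>
    intro d m h
    rw [List.foldl_cons]
    apply ih
    rw [PySem.Dict.getD_insert]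
    split_ifs with h'
    · rfl
    · exact h

-- keys are preserved by the nested modify loops
lemma pv_keys_inner (t i n : Int) (hi : i ∈ PySem.List.pyRange 0 n 1) (js : List Int) :
    ∀ (d : PySem.Dict Int (PySem.Set Int)), d.keys = PySem.List.pyRange 0 n 1 →
    (∀ j ∈ js, j ∈ PySem.List.pyRange 0 n 1) →
    ((js.foldl (fun d j =>
        if i ≠ j then
          if PySem.Int.mod (i + j + t) 3 = 0 then
            (d.modify i PySem.Set.empty (fun s => PySem.Set.add s j)).modify j PySem.Set.empty
              (fun s => PySem.Set.add s i)
          else d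
        else d) d).keys) = PySem.List.pyRange 0 n 1 := by
  induction js with
  | nil => intro d hd _; exact hd
  | cons j js ih =>
    intro d hd hjs
    rw [List.foldl_cons]
    apply ih _ _ (fun j' hj' => hjs j' (by simp [hj']))
    by_cases hij : i ≠ j
    · by_cases hmod : PySem.Int.mod (i + j + t) 3 = 0
      · simp only [if_pos hij, if_pos hmod]
        show ((d.modify i PySem.Set.empty (fun s => PySem.Set.add s j)).modify j PySem.Set.empty
            (fun s => PySem.Set.add s i)).keys = _
        have hci : d.contains i = true :=
          (PySem.Dict.contains_iff_mem_keys d i).2 (by rw [hd]; exact hi)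
        have h1 : (d.modify i PySem.Set.empty (fun s => PySem.Set.add s j)).keys
            = PySem.List.pyRange 0 n 1 := by
          rw [PySem.Dict.keys_modify, PySem.Dict.keys_insert_of_contains _ _ hci, hd]
        have hcj : (d.modify i PySem.Set.empty (fun s => PySem.Set.add s j)).contains j = true := by
          rw [PySem.Dict.contains_iff_mem_keys, h1]
          exact hjs j (by simp)
        rw [PySem.Dict.keys_modify, PySem.Dict.keys_insert_of_contains _ _ hcj, h1]
      · simp only [if_pos hij, if_neg hmod]; exact hd
    · simp only [if_neg hij]; exact hd

lemma pv_keys_outer (t n : Int) (is : List Int) :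
    ∀ (d : PySem.Dict Int (PySem.Set Int)), d.keys = PySem.List.pyRange 0 n 1 →
    (∀ i ∈ is, i ∈ PySem.List.pyRange 0 n 1) →
    ((is.foldl (fun d i =>
        (PySem.List.pyRange 0 n 1).foldl (fun d j =>
          if i ≠ j then
            if PySem.Int.mod (i + j + t) 3 = 0 then
              (d.modify i PySem.Set.empty (fun s => PySem.Set.add s j)).modify j PySem.Set.empty
                (fun s => PySem.Set.add s i)
            else d
          else d) d) d).keys) = PySem.List.pyRange 0 n 1 := by
  induction is with
  | nil => intro d hd _; exact hd
  | cons i is ih =>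
    intro d hd his
    rw [List.foldl_cons]
    apply ih _ _ (fun i' hi' => his i' (by simp [hi']))
    exact pv_keys_inner t i n (his i (by simp)) _ d hd (fun j hj => hj)

lemma pv_A_items (t n : Int) :
    create_test_network t n = (PySem.List.pyRange 0 n 1).map (fun m => (m, pvRow t n m)) := by
  simp only [create_test_network]
  have hinit_items : (((PySem.List.pyRange 0 n 1)).foldl
        (fun d i => d.insert i PySem.Set.empty) PySem.Dict.empty).items
      = (PySem.List.pyRange 0 n 1).map (fun i => (i, (PySem.Set.empty : PySem.Set Int))) := by
    have h := PySem.Dict.items_foldl_insert_fresh (PySem.List.pyRange 0 n 1) (fun a => a)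
        (fun _ => (PySem.Set.empty : PySem.Set Int)) PySem.Dict.empty
        (fun a _ => PySem.Dict.contains_empty a)
        (by simpa using PySem.List.nodup_pyRange_one 0 n)
    simpa [PySem.Dict.empty] using h
  have hkeys0 : (((PySem.List.pyRange 0 n 1)).foldl
        (fun d i => d.insert i PySem.Set.empty)
        (PySem.Dict.empty : PySem.Dict Int (PySem.Set Int))).keys
      = PySem.List.pyRange 0 n 1 := by
    simp only [PySem.Dict.keys]
    rw [hinit_items]
    simp [Function.comp_def]
  have hkeysD := pv_keys_outer t n (PySem.List.pyRange 0 n 1) _ hkeys0 (fun i hi => hi)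
  rw [PySem.Dict.items_eq_map_keys _ (by rw [hkeysD]; exact PySem.List.nodup_pyRange_one 0 n)
      PySem.Set.empty, hkeysD]
  apply List.map_congr_left
  intro m hm
  have hm' := (PySem.List.mem_pyRange_one).1 hm
  show (m, _) = (m, pvRow t n m)
  congr 1
  rw [pv_outer_getD, pv_init_getD _ _ _ (PySem.Dict.getD_empty _ _)]
  have hempty : (PySem.Set.empty : PySem.Set Int) = ([] : List Int) := rfl
  rw [hempty]
  have hcast : ((n.toNat : Int)) = n := Int.toNat_of_nonneg (by omega)
  have hinv := pv_inv t n n.toNat (by rw [hcast]) m hm'.1 hm'.2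
  rw [hcast] at hinv
  rw [hinv, if_pos hm'.2]

-- ----- B side -----

lemma pv_buckets_getD (L : List Int) (d : PySem.Dict Int (List Int)) (r : Int) :
    ((L.foldl (fun b node => b.modify (PySem.Int.mod node 3) [] (fun l => l ++ [node])) d).getD r [])
      = d.getD r [] ++ L.filter (fun node => PySem.Int.mod node 3 == r) := by
  have hmap : (L.foldl (fun b node => b.modify (PySem.Int.mod node 3) [] (fun l => l ++ [node])) d)
      = ((L.map (fun node => (PySem.Int.mod node 3, node))).foldl
          (fun b p => b.modify p.1 [] (fun l => l ++ [p.2])) d) := by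
    rw [List.foldl_map]
  rw [hmap, PySem.Dict.getD_foldl_modify_append, List.filter_map]
  simp [Function.comp_def]

lemma pv_init_buckets_getD (r : Int) :
    ((PySem.Dict.ofList [((0 : Int), ([] : List Int)), (1, []), (2, [])]).getD r []) = [] := by
  have h : PySem.Dict.ofList [((0 : Int), ([] : List Int)), (1, []), (2, [])]
      = PySem.Dict.mk [(0, []), (1, []), (2, [])] := by decide
  rw [h, PySem.Dict.getD_eq_get?_getD, PySem.Dict.get?_mk_cons, PySem.Dict.get?_mk_cons,
    PySem.Dict.get?_mk_cons]
  split_ifs <;> rfl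

lemma pv_ofList_nodup (xs : List Int) (h : xs.Nodup) : PySem.Set.ofList xs = xs :=
  PySem.Set.ofList_eq_self_of_nodup xs h

lemma pv_discard_eq (s : List Int) (x : Int) :
    PySem.Set.discard s x = s.filter (fun j => decide (j ≠ x)) := by
  simp only [PySem.Set.discard]
  apply List.filter_congr
  intro j _
  by_cases h : j = x <;> simp [h]

lemma pv_row_eq (t n m : Int) :
    ((PySem.List.pyRange 0 n 1).filter
        (fun j => PySem.Int.mod j 3 == PySem.Int.mod (-m - t) 3)).filter
        (fun j => decide (j ≠ m))
      = pvRow t n m := by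
  unfold pvRow
  rw [List.filter_filter]
  apply List.filter_congr
  intro j _
  have h3 : (0 : Int) < 3 := by norm_num
  simp only [pvPred, PySem.Int.mod_eq_emod_of_pos h3]
  by_cases hjm : j = m
  · simp [hjm]
  · by_cases hc : (m + j + t) % 3 = 0
    · simp [hjm, hc, show j % 3 = (-m - t) % 3 from by omega]
    · simp [hjm, hc, show ¬(j % 3 = (-m - t) % 3) from by omega]

lemma pv_B_items (t n : Int) :
    create_test_network_alt t n = (PySem.List.pyRange 0 n 1).map (fun m => (m, pvRow t n m)) := by
  simp only [create_test_network_alt]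
  have h := PySem.Dict.items_foldl_insert_fresh (PySem.List.pyRange 0 n 1) (fun a => a)
      (fun i => PySem.Set.discard (PySem.Set.ofList
        (((PySem.List.pyRange 0 n 1).foldl
            (fun b node => b.modify (PySem.Int.mod node 3) [] (fun l => l ++ [node]))
            (PySem.Dict.ofList [(0, []), (1, []), (2, [])])).getD
          (PySem.Int.mod (-i - t) 3) [])) i)
      PySem.Dict.empty (fun a _ => PySem.Dict.contains_empty a)
      (by simpa using PySem.List.nodup_pyRange_one 0 n)
  simp only [PySem.Dict.empty] at h ⊢
  rw [h, List.nil_append]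
  apply List.map_congr_left
  intro m hm
  show (m, _) = (m, pvRow t n m)
  congr 1
  rw [pv_buckets_getD, pv_init_buckets_getD, List.nil_append]
  rw [pv_ofList_nodup]
  · rw [pv_discard_eq, pv_row_eq]
  · exact (PySem.List.nodup_pyRange_one 0 n).filter _

-- ===== VERDICT (by name: the statement is the Claim_ definition above) =====
theorem create_test_network_spec : Claim_equal_create_test_network := by
  intro t n _
  show create_test_network t n = create_test_network_alt t n
  rw [pv_A_items, pv_B_items]
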